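-- pv_equiv track=rewrite | github.com/bbchen33/Make-Primers | make_primers.py | calculate_Tm
-- ===== SOURCE A (Python) =====
-- def calculate_Tm(input_sequence): # simple function to calculate Tm based on the DNA sequence
-- 	input_sequence = input_sequence.upper()
-- 	Tm = 0
-- 	for nucleotide in input_sequence:
-- 		if nucleotide in ['A','T']:
-- 			Tm += 2
-- 		else:
-- 			Tm += 4
-- 	return Tm
-- ===== SOURCE B (Python) =====
-- def calculate_Tm(input_sequence):
--     # build a character histogram once, then take a weighted sum over the
--     # distinct characters (A/T weigh 2, everything else 4)
--     freq = {}
--     for nucleotide in input_sequence.upper():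
--         freq[nucleotide] = freq.get(nucleotide, 0) + 1
--     return sum((2 if base in ('A', 'T') else 4) * count
--                for base, count in freq.items())
-- ===== Notes on version B (the rewrite author's own statement) =====
-- stated objective: alternative
-- what changed: B builds a frequency dictionary of the uppercased sequence in one pass and then computes the Tm as a weighted sum over the distinct characters and their multiplicities, instead of A's per-nucleotide branch-and-accumulate loop.
import Mathlib
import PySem

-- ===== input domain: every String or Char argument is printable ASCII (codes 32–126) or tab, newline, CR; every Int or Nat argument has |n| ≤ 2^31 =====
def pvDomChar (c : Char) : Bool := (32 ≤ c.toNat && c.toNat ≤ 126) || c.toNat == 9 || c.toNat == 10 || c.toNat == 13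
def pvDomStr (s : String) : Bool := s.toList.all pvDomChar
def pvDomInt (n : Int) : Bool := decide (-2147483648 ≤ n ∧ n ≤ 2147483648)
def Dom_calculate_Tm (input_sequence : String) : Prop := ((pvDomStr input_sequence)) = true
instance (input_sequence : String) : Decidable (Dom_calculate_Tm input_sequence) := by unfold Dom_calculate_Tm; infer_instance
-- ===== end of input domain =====

-- B replaces A's per-nucleotide accumulate loop by a character histogram built once,
-- then a weighted sum over the distinct characters; objective: alternative.

-- ===== PORT A =====
-- per-character loop: +2 for A/T, +4 otherwise, over the uppercased sequence
def calculate_Tm (input_sequence : String) : Int :=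
  (PySem.Chars.upper input_sequence.toList).foldl
    (fun Tm nucleotide => if nucleotide ∈ (['A', 'T'] : List Char) then Tm + 2 else Tm + 4) 0

-- ===== PORT B =====
-- histogram loop (freq[c] = freq.get(c,0)+1), then a weighted sum over freq.items()
def calculate_Tm_alt (input_sequence : String) : Int :=
  let s := PySem.Chars.upper input_sequence.toList
  let freq : PySem.Dict Char Int :=
    s.foldl (fun d nucleotide => d.insert nucleotide (d.getD nucleotide 0 + 1)) PySem.Dict.empty
  freq.items.foldl
    (fun acc p => acc + (if p.1 ∈ (['A', 'T'] : List Char) then (2 : Int) else 4) * p.2) 0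

-- ===== PRECONDITION & SPEC =====
def Spec_calculate_Tm (input_sequence : String) (out : Int) : Prop := out = calculate_Tm_alt input_sequence
instance (input_sequence : String) (out : Int) : Decidable (Spec_calculate_Tm input_sequence out) := by unfold Spec_calculate_Tm; infer_instance

-- ===== CLAIM (what is proved, stated in full; the proofs are below) =====
def Claim_equal_calculate_Tm : Prop := ∀ (input_sequence : String), Dom_calculate_Tm input_sequence → Spec_calculate_Tm input_sequence (calculate_Tm input_sequence)

-- ===== LEMMAS AND PROOFS =====

-- summing 'if k = a then c else 0' over a Nodup list containing a gives c
lemma sum_ite_single (d : List Char) (hd : d.Nodup) (a : Char) (ha : a ∈ d) (c : Int) :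
    (d.map (fun k => if k = a then c else 0)).sum = c := by
  induction d with
  | nil => cases ha
  | cons x t ih =>
    simp only [List.map_cons, List.sum_cons]
    rcases List.mem_cons.mp ha with rfl | hat
    · have hz : ∀ k ∈ t, (if k = a then c else 0) = 0 := by
        intro k hk
        have : k ≠ a := fun e => (List.nodup_cons.mp hd).1 (e ▸ hk)
        simp [this]
      rw [List.map_congr_left hz]
      simp
    · have hne : x ≠ a := fun e => (List.nodup_cons.mp hd).1 (e ▸ hat)
      rw [ih (List.nodup_cons.mp hd).2 hat]
      simp [hne]

-- the key histogram lemma: the weighted sum over distinct characters with their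
-- multiplicities equals the per-character weighted sum
lemma weighted_count_sum (w : Char → Int) (s : List Char) :
    ((PySem.Set.ofList s).map (fun k => w k * (s.count k : Int))).sum = (s.map w).sum := by
  induction s using List.reverseRecOn with
  | nil => simp [PySem.Set.ofList_nil]
  | append_singleton t a ih =>
    rw [PySem.Set.ofList_append_singleton]
    have hcount : ∀ k, (t ++ [a]).count k = t.count k + (if k = a then 1 else 0) := by
      intro k
      rw [List.count_append]
      by_cases hk : k = a
      · subst hk; simp
      · simp [hk, Ne.symm hk]
    by_cases hmem : a ∈ t
    · rw [PySem.Set.add_of_mem ((PySem.Set.mem_ofList t a).mpr hmem)]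
      have : ∀ k ∈ PySem.Set.ofList t,
          w k * ((t ++ [a]).count k : Int)
            = (fun k => w k * (t.count k : Int)) k + (fun k => if k = a then w a else 0) k := by
        intro k _
        rw [hcount k]
        by_cases hk : k = a <;> simp [hk] ; ring
      rw [List.map_congr_left this]
      have hsplit : ((PySem.Set.ofList t).map
          (fun k => (fun k => w k * (t.count k : Int)) k + (fun k => if k = a then w a else 0) k)).sum
          = ((PySem.Set.ofList t).map (fun k => w k * (t.count k : Int))).sum
            + ((PySem.Set.ofList t).map (fun k => if k = a then w a else 0)).sum := by
        induction (PySem.Set.ofList t : List Char) with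
        | nil => simp
        | cons h t' ih' => simp only [List.map_cons, List.sum_cons, ih']; ring
      rw [hsplit, ih,
        sum_ite_single _ (PySem.Set.nodup_ofList t) a ((PySem.Set.mem_ofList t a).mpr hmem)]
      simp
    · rw [PySem.Set.add_of_not_mem (fun h => hmem ((PySem.Set.mem_ofList t a).mp h))]
      rw [List.map_append, List.sum_append]
      have : ∀ k ∈ PySem.Set.ofList t,
          w k * ((t ++ [a]).count k : Int) = w k * (t.count k : Int) := by
        intro k hk
        have : k ≠ a := fun e => hmem (e ▸ (PySem.Set.mem_ofList t k).mp hk)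
        rw [hcount k]; simp [this]
      rw [List.map_congr_left this, ih]
      have hac : t.count a = 0 := List.count_eq_zero.mpr hmem
      simp [hac]

-- A's fold is the per-character weighted sum
lemma a_fold_eq (s : List Char) :
    s.foldl (fun Tm nucleotide => if nucleotide ∈ (['A', 'T'] : List Char) then Tm + 2 else Tm + 4) 0
      = (s.map (fun c => if c ∈ (['A', 'T'] : List Char) then (2 : Int) else 4)).sum := by
  have := PySem.List.foldl_add
    (g := fun c => if c ∈ (['A', 'T'] : List Char) then (2 : Int) else 4) (l := s) (a := 0)
  simp only [zero_add] at this
  rw [← this]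
  apply PySem.List.foldl_congr_mem
  intro acc c _
  by_cases h : c ∈ (['A', 'T'] : List Char) <;> simp [h]

-- ===== VERDICT (by name: the statement is the Claim_ definition above) =====
theorem calculate_Tm_spec : Claim_equal_calculate_Tm := by
  intro str _
  unfold Spec_calculate_Tm
  simp only [calculate_Tm, calculate_Tm_alt]
  set s := PySem.Chars.upper str.toList with hs
  rw [PySem.Dict.foldl_insert_getD_add_one_eq_counter]
  rw [a_fold_eq]
  have hfold := PySem.List.foldl_add
    (g := fun p : Char × Int => (if p.1 ∈ (['A', 'T'] : List Char) then (2 : Int) else 4) * p.2)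
    (l := (PySem.Dict.counter s).items) (a := 0)
  simp only [zero_add] at hfold
  rw [hfold, PySem.Dict.items_counter, List.map_map]
  exact (weighted_count_sum (fun c => if c ∈ (['A', 'T'] : List Char) then (2 : Int) else 4) s).symm
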